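-- pv_equiv track=rewrite | github.com/leelavenkatsai/venkat_cp_66 | isKingsTour.py | isKingsTour
-- ===== SOURCE A (Python) =====
-- def position(a,b):
--     l=[0,0]
--     for i in range(len(a)):
--         for j in range(len(a[0])):
--             if(b==a[i][j]):
--                 l[0]=i
--                 l[1]=j
--     return l
--
-- def isKingsTour(L):
--     n=len(L)
--     k=len(L[0])
--     f=n*k
--     for i in range(1,f):
--         a1=position(L,i)
--         a2=position(L,i+1)
--         m=abs(a1[0]-a2[0])
--         c=abs(a1[1]-a2[1])
--         if(m==1 and c==0):
--             continue
--         elif(m==0 and c==1):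
--             continue
--         elif(m==1 and c==1):
--             continue
--         else:
--             return False
--     return True
-- ===== SOURCE B (Python) =====
-- def isKingsTour(L):
--     n = len(L)
--     k = len(L[0])
--     # one pass: value -> (row, col); on duplicates the last (row-major) cell wins,
--     # values absent from the grid map to (0, 0)
--     pos = {}
--     for i in range(n):
--         row = L[i]
--         for j in range(k):
--             pos[row[j]] = (i, j)
--     prev = pos.get(1, (0, 0))
--     for v in range(2, n * k + 1):
--         cur = pos.get(v, (0, 0))
--         if max(abs(cur[0] - prev[0]), abs(cur[1] - prev[1])) != 1:
--             return False
--         prev = cur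
--     return True
-- ===== Notes on version B (the rewrite author's own statement) =====
-- stated objective: alternative
-- what changed: B builds one value->cell dict in a single row-major pass and then checks consecutive king moves with a carried previous cell (Chebyshev-distance test), instead of A's full-grid position() search run twice per value; asymptotically this removes A's quadratic blow-up on valid tours, but on typical (early-rejected) inputs both are O(n*k), so no speed is claimed.
import Mathlib
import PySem

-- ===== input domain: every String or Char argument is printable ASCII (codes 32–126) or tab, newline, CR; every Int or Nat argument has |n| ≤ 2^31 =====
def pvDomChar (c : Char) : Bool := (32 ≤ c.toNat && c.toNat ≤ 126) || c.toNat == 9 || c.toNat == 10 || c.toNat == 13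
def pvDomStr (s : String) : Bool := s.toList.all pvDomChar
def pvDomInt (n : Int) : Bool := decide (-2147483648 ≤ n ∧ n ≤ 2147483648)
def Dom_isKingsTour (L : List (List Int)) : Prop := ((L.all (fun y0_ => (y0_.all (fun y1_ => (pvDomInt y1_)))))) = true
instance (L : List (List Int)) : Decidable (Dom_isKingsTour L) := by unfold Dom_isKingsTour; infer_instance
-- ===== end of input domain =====

-- B replaces A's per-value full-grid search (position) by one dict built in a single
-- row-major pass (value → last cell, absent values defaulting to (0,0), exactly as
-- position's [0,0] default) and a single scan over consecutive values (objective: alternative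
-- single-pass algorithm; no speed is claimed).

-- ===== PORT A =====
-- position(a, b): last (i, j) in row-major order (first len(a[0]) columns) with a[i][j] == b, else (0, 0)
def position (a : List (List Int)) (b : Int) : Int × Int :=
  (PySem.List.pyRange 0 (PySem.List.len a) 1).foldl (fun l i =>
    (PySem.List.pyRange 0 (PySem.List.len (PySem.List.pyGetD a 0 [])) 1).foldl (fun l j =>
      if b = PySem.List.pyGetD (PySem.List.pyGetD a i []) j 0 then (i, j) else l) l) (0, 0)

-- the for-loop of isKingsTour with its early 'return False', as structural recursion
def tourLoop (L : List (List Int)) : List Int → Bool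
  | [] => true
  | i :: rest =>
    let a1 := position L i
    let a2 := position L (i + 1)
    let m := |a1.1 - a2.1|
    let c := |a1.2 - a2.2|
    if m = 1 ∧ c = 0 then tourLoop L rest
    else if m = 0 ∧ c = 1 then tourLoop L rest
    else if m = 1 ∧ c = 1 then tourLoop L rest
    else false

def isKingsTour (L : List (List Int)) : Bool :=
  let n := PySem.List.len L
  let k := PySem.List.len (PySem.List.pyGetD L 0 [])
  let f := n * k
  tourLoop L (PySem.List.pyRange 1 f 1)

-- ===== PORT B =====
-- one row-major pass: value → (row, col), later duplicates overwrite
def buildPos (L : List (List Int)) (k : Int) : PySem.Dict Int (Int × Int) :=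
  (PySem.List.pyRange 0 (PySem.List.len L) 1).foldl (fun d i =>
    let row := PySem.List.pyGetD L i []
    (PySem.List.pyRange 0 k 1).foldl (fun d j =>
      d.insert (PySem.List.pyGetD row j 0) (i, j)) d) PySem.Dict.empty

-- the for-loop of B with its early 'return False'
def altLoop (pos : PySem.Dict Int (Int × Int)) (prev : Int × Int) : List Int → Bool
  | [] => true
  | v :: rest =>
    let cur := pos.getD v (0, 0)
    if max |cur.1 - prev.1| |cur.2 - prev.2| ≠ 1 then false
    else altLoop pos cur rest

def isKingsTour_alt (L : List (List Int)) : Bool :=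
  let n := PySem.List.len L
  let k := PySem.List.len (PySem.List.pyGetD L 0 [])
  let pos := buildPos L k
  altLoop pos (pos.getD 1 (0, 0)) (PySem.List.pyRange 2 (n * k + 1) 1)

-- ===== PRECONDITION & SPEC =====
-- Exactly where the Python A returns: L must be nonempty (len(L[0])) and every row must have
-- at least len(L[0]) columns (position reads a[i][j] for all j < len(a[0]): IndexError otherwise).
def Pre_isKingsTour (L : List (List Int)) : Prop :=
  L ≠ [] ∧ ∀ row ∈ L, (L.headD []).length ≤ row.length
instance (L : List (List Int)) : Decidable (Pre_isKingsTour L) := by unfold Pre_isKingsTour; infer_instance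

def pvWitness_isKingsTour : List (List Int) := [[1, 2], [4, 3]]

def Spec_isKingsTour (L : List (List Int)) (out : Bool) : Prop := out = isKingsTour_alt L
instance (L : List (List Int)) (out : Bool) : Decidable (Spec_isKingsTour L out) := by unfold Spec_isKingsTour; infer_instance

-- ===== CLAIM (what is proved, stated in full; the proofs are below) =====
def Claim_equal_isKingsTour : Prop := ∀ (L : List (List Int)), Dom_isKingsTour L → Pre_isKingsTour L → Spec_isKingsTour L (isKingsTour L)

-- ===== LEMMAS AND PROOFS =====

-- the grid cells both programs scan, row-major, as (i, j) index pairs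
def cellIdx (L : List (List Int)) (k : Int) : List (Int × Int) :=
  (PySem.List.pyRange 0 (PySem.List.len L) 1).flatMap (fun i =>
    (PySem.List.pyRange 0 k 1).map (fun j => (i, j)))

def cellVal (L : List (List Int)) (p : Int × Int) : Int :=
  PySem.List.pyGetD (PySem.List.pyGetD L p.1 []) p.2 0

lemma position_eq_foldl_cells (L : List (List Int)) (b : Int) :
    position L b
      = (cellIdx L (PySem.List.len (PySem.List.pyGetD L 0 []))).foldl
          (fun l p => if b = cellVal L p then p else l) (0, 0) := by
  simp only [position, cellIdx, cellVal, List.foldl_flatMap, List.foldl_map]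
  rfl

lemma buildPos_eq_foldl_cells (L : List (List Int)) (k : Int) :
    buildPos L k
      = (cellIdx L k).foldl (fun d p => d.insert (cellVal L p) p) PySem.Dict.empty := by
  simp only [buildPos, cellIdx, cellVal, List.foldl_flatMap, List.foldl_map]

lemma getD_foldl_insert_eq_lastmatch (l : List (Int × Int)) (val : Int × Int → Int)
    (d : PySem.Dict Int (Int × Int)) (b : Int) (d0 : Int × Int) :
    (l.foldl (fun d p => d.insert (val p) p) d).getD b d0
      = l.foldl (fun acc p => if b = val p then p else acc) (d.getD b d0) := by
  induction l generalizing d with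
  | nil => rfl
  | cons p t ih =>
    simp only [List.foldl_cons, ih, PySem.Dict.getD_insert]

-- the dict B builds answers every query exactly as A's position does
lemma getD_buildPos (L : List (List Int)) (b : Int) :
    (buildPos L (PySem.List.len (PySem.List.pyGetD L 0 []))).getD b (0, 0) = position L b := by
  rw [buildPos_eq_foldl_cells, position_eq_foldl_cells,
    getD_foldl_insert_eq_lastmatch (val := cellVal L), PySem.Dict.getD_empty]

-- both check-loops agree when B's dict answers like position
lemma loops_align (L : List (List Int)) (pos : PySem.Dict Int (Int × Int))
    (hpos : ∀ b, pos.getD b (0, 0) = position L b) :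
    ∀ (n : Nat) (a : Int),
      tourLoop L (PySem.List.pyRange a (a + n) 1)
        = altLoop pos (position L a) (PySem.List.pyRange (a + 1) (a + n + 1) 1) := by
  intro n
  induction n with
  | zero =>
    intro a
    simp [PySem.List.pyRange_one_eq_nil, tourLoop, altLoop]
  | succ q ih =>
    intro a
    have e1 : a + ((q + 1 : Nat) : Int) = a + 1 + q := by push_cast; ring
    rw [e1, PySem.List.pyRange_one_cons (by omega : a < a + 1 + (q : Int)),
        PySem.List.pyRange_one_cons (by omega : a + 1 < a + 1 + (q : Int) + 1)]
    simp only [tourLoop, altLoop, hpos]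
    rw [abs_sub_comm ((position L (a + 1)).1), abs_sub_comm ((position L (a + 1)).2)]
    set m := |(position L a).1 - (position L (a + 1)).1| with hmdef
    set c := |(position L a).2 - (position L (a + 1)).2| with hcdef
    have hm : 0 ≤ m := abs_nonneg _
    have hc : 0 ≤ c := abs_nonneg _
    by_cases h1 : max m c ≠ 1
    · have h2 : ¬(m = 1 ∧ c = 0) ∧ ¬(m = 0 ∧ c = 1) ∧ ¬(m = 1 ∧ c = 1) := by omega
      rw [if_neg h2.1, if_neg h2.2.1, if_neg h2.2.2, if_pos h1]
    · have hrec := ih (a + 1)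
      rw [if_neg h1]
      have h2 : (m = 1 ∧ c = 0) ∨ (m = 0 ∧ c = 1) ∨ (m = 1 ∧ c = 1) := by omega
      rcases h2 with h2 | h2 | h2
      · rw [if_pos h2]; exact hrec
      · rw [if_neg (by omega), if_pos h2]; exact hrec
      · by_cases h3 : c = 0
        · rw [if_pos ⟨h2.1, h3⟩]; exact hrec
        · rw [if_neg (by omega), if_neg (by omega), if_pos h2]; exact hrec

-- ===== VERDICT (by name: the statement is the Claim_ definition above) =====
theorem isKingsTour_spec : Claim_equal_isKingsTour := by
  intro L _ _
  unfold Spec_isKingsTour isKingsTour isKingsTour_alt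
  dsimp only
  have hpos : ∀ b, (buildPos L (PySem.List.len (PySem.List.pyGetD L 0 []))).getD b (0, 0)
      = position L b := fun b => getD_buildPos L b
  rw [hpos]
  set f := PySem.List.len L * PySem.List.len (PySem.List.pyGetD L 0 []) with hf
  by_cases hle : f ≤ 1
  · rw [PySem.List.pyRange_one_eq_nil (by omega), PySem.List.pyRange_one_eq_nil (by omega)]
    rfl
  · have h := loops_align L _ hpos (f - 1).toNat 1
    have hn : (1 : Int) + ((f - 1).toNat : Int) = f := by omega
    rw [hn, show (1 : Int) + 1 = 2 by norm_num] at h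
    exact h
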